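-- pv_equiv track=rewrite | github.com/colding10/cp-notebook | ccodes24/i.py | min_moves_to_transform
-- ===== SOURCE A (Python) =====
-- def min_moves_to_transform(n, s, t):
--     def letter_value(ch):
--         return ord(ch) - ord('a')
--
--     def reverse_letter(ch):
--         val = letter_value(ch)
--         return chr(ord('a') + (25 - val))
--
--     def opposite_letter(ch):
--         val = letter_value(ch)
--         return chr(ord('a') + ((val + 13) % 26))
--
--     reverse_map = [reverse_letter(chr(i + ord('a'))) for i in range(26)]
--     opposite_map = [opposite_letter(chr(i + ord('a'))) for i in range(26)]
--
--     def transformation_type(c1, c2):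
--         if c2 == reverse_map[letter_value(c1)]:
--             return 'reverse'
--         if c2 == opposite_map[letter_value(c1)]:
--             return 'opposite'
--         return None
--
--     current_transformation = None
--     moves = 0
--
--     for i in range(n):
--         trans_type = transformation_type(s[i], t[i])
--
--         if trans_type:
--             if trans_type != current_transformation:
--                 if current_transformation is not None:
--                     moves += 1
--                 current_transformation = trans_type
--         else:
--             return -1
--
--     if current_transformation:
--         moves += 1
--
--     return moves
-- ===== SOURCE B (Python) =====
-- def min_moves_to_transform(n, s, t):
--     # Classify position i: 0 = reverse pair, 1 = opposite pair, None = neither.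
--     def classify(i):
--         vs = ord(s[i]) - ord('a')
--         vt = ord(t[i]) - ord('a')
--         if vt == 25 - vs % 26:
--             return 0
--         if vt == (vs + 13) % 26:
--             return 1
--         return None
--
--     # Divide & conquer over [lo, hi): returns (first_type, last_type, runs),
--     # or None if some pair in the segment is no transformation (leftmost failure wins).
--     def solve(lo, hi):
--         if hi - lo == 1:
--             c = classify(lo)
--             if c is None:
--                 return None
--             return (c, c, 1)
--         mid = (lo + hi) // 2
--         left = solve(lo, mid)
--         if left is None:
--             return None
--         right = solve(mid, hi)
--         if right is None:
--             return None
--         runs = left[2] + right[2]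
--         if left[1] == right[0]:
--             runs -= 1
--         return (left[0], right[1], runs)
--
--     if n <= 0:
--         return 0
--     res = solve(0, n)
--     return -1 if res is None else res[2]
-- ===== Notes on version B (the rewrite author's own statement) =====
-- stated objective: alternative
-- what changed: Replaces A's stateful left-to-right scan (lookup tables + current-transformation/moves accumulator) by a divide-and-conquer: each half of [0,n) is solved recursively into (first_type, last_type, run_count) and the halves are merged, subtracting one run when the boundary types coincide; classification is arithmetic instead of table lookup.
import Mathlib
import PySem

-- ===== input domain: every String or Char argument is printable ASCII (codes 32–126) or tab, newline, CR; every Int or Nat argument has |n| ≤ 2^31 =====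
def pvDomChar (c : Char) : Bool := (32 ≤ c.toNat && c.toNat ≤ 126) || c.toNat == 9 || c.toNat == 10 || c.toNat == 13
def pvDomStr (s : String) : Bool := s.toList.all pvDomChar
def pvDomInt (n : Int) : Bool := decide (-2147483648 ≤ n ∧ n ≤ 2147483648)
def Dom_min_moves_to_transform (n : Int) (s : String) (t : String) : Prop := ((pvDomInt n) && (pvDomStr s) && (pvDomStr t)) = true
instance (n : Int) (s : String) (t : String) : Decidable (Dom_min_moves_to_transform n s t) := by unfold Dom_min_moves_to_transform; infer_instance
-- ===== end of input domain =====

-- B replaces A's stateful left-to-right scan by a divide-and-conquer that merges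
-- (first_type, last_type, run_count) triples of the two halves. Objective: alternative. Same O(n) cost.

-- ===== PORT A =====
-- Python's 'reverse'/'opposite' string tags, ported as an enumeration.
inductive pvTrans | rev | opp
deriving DecidableEq, Repr

def pvA_letter_value (c : Char) : Int := (c.toNat : Int) - 97

-- chr(v): exact for the in-range codes A feeds it (97..122)
def pvA_chr (v : Int) : Char := Char.ofNat v.toNat

def pvA_reverse_letter (c : Char) : Char := pvA_chr (97 + (25 - pvA_letter_value c))

def pvA_opposite_letter (c : Char) : Char := pvA_chr (97 + PySem.Int.mod (pvA_letter_value c + 13) 26)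

def pvA_reverse_map : List Char := (PySem.List.pyRange 0 26 1).map (fun i => pvA_reverse_letter (pvA_chr (i + 97)))

def pvA_opposite_map : List Char := (PySem.List.pyRange 0 26 1).map (fun i => pvA_opposite_letter (pvA_chr (i + 97)))

-- transformation_type; outer none = IndexError from the map lookup, inner none = Python's None
def pvA_transformation_type (c1 c2 : Char) : Option (Option pvTrans) :=
  match PySem.List.pyGet? pvA_reverse_map (pvA_letter_value c1) with
  | none => none
  | some r =>
    if c2 == r then some (some .rev)
    else
      match PySem.List.pyGet? pvA_opposite_map (pvA_letter_value c1) with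
      | none => none
      | some o => if c2 == o then some (some .opp) else some none

-- the 'for i in range(n)' loop, as a counter recursion (Python's range is lazy);
-- none = an exception (IndexError) escaped the loop
def pvA_loop (s t : List Char) (n i : Int) (cur : Option pvTrans) (moves : Int) : Option Int :=
  if h : i < n then
    match PySem.List.pyGet? s i, PySem.List.pyGet? t i with
    | some si, some ti =>
      (match pvA_transformation_type si ti with
       | none => none
       | some none => some (-1)
       | some (some ty) =>
         if some ty ≠ cur then
           pvA_loop s t n (i + 1) (some ty) (if cur.isSome then moves + 1 else moves)
         else
           pvA_loop s t n (i + 1) cur moves)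
    | _, _ => none
  else some (if cur.isSome then moves + 1 else moves)
termination_by (n - i).toNat
decreasing_by all_goals omega

def min_moves_to_transform (n : Int) (s : String) (t : String) : Int :=
  (pvA_loop s.toList t.toList n 0 none 0).getD 0

-- ===== PORT B =====
-- classify(i): 0 = reverse pair, 1 = opposite pair; inner none = Python's None (no transformation),
-- outer none = IndexError from s[i]/t[i]
def pvB_classify1 (s t : List Char) (i : Int) : Option (Option Int) :=
  match PySem.List.pyGet? s i, PySem.List.pyGet? t i with
  | some si, some ti =>
    (let vs : Int := (si.toNat : Int) - 97
     let vt : Int := (ti.toNat : Int) - 97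
     if vt = 25 - PySem.Int.mod vs 26 then some (some 0)
     else if vt = PySem.Int.mod (vs + 13) 26 then some (some 1)
     else some none)
  | _, _ => none

-- solve(lo, hi): divide & conquer over [lo, hi); some (some (first, last, runs)),
-- some none = Python's None (an invalid pair, leftmost failure wins), none = IndexError.
-- Python tests 'hi - lo == 1'; the '≤ 1' here is only a totality guard: every call the
-- Python entry makes has hi - lo ≥ 1 (and the split keeps both halves ≥ 1), where both agree.
def pvB_solve (s t : List Char) (lo hi : Int) : Option (Option (Int × Int × Int)) :=
  if h1 : hi - lo ≤ 1 then
    match pvB_classify1 s t lo with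
    | none => none
    | some none => some none
    | some (some c) => some (some (c, c, 1))
  else
    match pvB_solve s t lo (PySem.Int.floordiv (lo + hi) 2) with
    | none => none
    | some none => some none
    | some (some (lf, ll, lr)) =>
      match pvB_solve s t (PySem.Int.floordiv (lo + hi) 2) hi with
      | none => none
      | some none => some none
      | some (some (rf, rl, rr)) =>
        some (some (lf, rl, lr + rr - (if ll = rf then 1 else 0)))
termination_by (hi - lo).toNat
decreasing_by
  all_goals
    have hm : PySem.Int.floordiv (lo + hi) 2 = (lo + hi) / 2 :=
      PySem.Int.floordiv_eq_ediv_of_pos (by omega)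
    omega

def min_moves_to_transform_alt (n : Int) (s : String) (t : String) : Int :=
  if n ≤ 0 then 0
  else
    match pvB_solve s.toList t.toList 0 n with
    | some (some r) => r.2.2
    | some none => -1
    | none => 0

-- ===== PRECONDITION & SPEC =====
-- index i is within both strings and s[i]'s code is 71..122 (so A's map lookup does not raise)
def pvSafe (s t : List Char) (i : Nat) : Bool :=
  decide (i < s.length) && decide (i < t.length) &&
  decide (71 ≤ (s.getD i 'a').toNat) && decide ((s.getD i 'a').toNat ≤ 122)

-- index i is safe and the pair (s[i], t[i]) is a reverse or opposite transformation
def pvValid (s t : List Char) (i : Nat) : Bool :=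
  pvSafe s t i &&
  (decide (((t.getD i 'a').toNat : Int) - 97 = 25 - PySem.Int.mod (((s.getD i 'a').toNat : Int) - 97) 26) ||
   decide (((t.getD i 'a').toNat : Int) - 97 = PySem.Int.mod ((((s.getD i 'a').toNat : Int) - 97) + 13) 26))

-- Pre_ excludes exactly the inputs on which A raises IndexError: the scan reaches an index i < n that
-- runs past a string's end or whose s-character code is outside 71..122 before any earlier pair fails
-- to be a transformation (the bound min(n, len(s)+1) is equivalent: beyond len(s) the antecedent is false).
def Pre_min_moves_to_transform (n : Int) (s : String) (t : String) : Prop :=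
  ∀ i : Nat, i < min n.toNat (s.toList.length + 1) →
    (∀ j : Nat, j < i → pvValid s.toList t.toList j = true) → pvSafe s.toList t.toList i = true

instance (n : Int) (s : String) (t : String) : Decidable (Pre_min_moves_to_transform n s t) := by
  unfold Pre_min_moves_to_transform; infer_instance

def pvWitness_min_moves_to_transform : Int × String × String := (4, "abno", "zyan")

def Spec_min_moves_to_transform (n : Int) (s : String) (t : String) (out : Int) : Prop := out = min_moves_to_transform_alt n s t
instance (n : Int) (s : String) (t : String) (out : Int) : Decidable (Spec_min_moves_to_transform n s t out) := by unfold Spec_min_moves_to_transform; infer_instance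

-- ===== CLAIM (what is proved, stated in full; the proofs are below) =====
def Claim_equal_min_moves_to_transform : Prop := ∀ (n : Int) (s : String) (t : String), Dom_min_moves_to_transform n s t → Pre_min_moves_to_transform n s t → Spec_min_moves_to_transform n s t (min_moves_to_transform n s t)

-- ===== LEMMAS AND PROOFS =====

theorem pv_char_beq (c d : Char) : (c == d) = (c.toNat == d.toNat) := by
  rcases c with ⟨⟨cv, _⟩, hc⟩; rcases d with ⟨⟨dv, _⟩, hd⟩
  simp [Char.toNat, BEq.beq, Char.ext_iff, UInt32.ext_iff]

theorem pv_reverse_map_get (v : Int) (h1 : -26 ≤ v) (h2 : v ≤ 25) :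
    PySem.List.pyGet? pvA_reverse_map v = some (Char.ofNat (122 - PySem.Int.mod v 26).toNat) := by
  interval_cases v <;> decide

theorem pv_opposite_map_get (v : Int) (h1 : -26 ≤ v) (h2 : v ≤ 25) :
    PySem.List.pyGet? pvA_opposite_map v = some (Char.ofNat (97 + PySem.Int.mod (v + 13) 26).toNat) := by
  interval_cases v <;> decide

theorem pv_toNat_ofNat (k : Nat) (h : k < 55296) : (Char.ofNat k).toNat = k := by
  rw [Char.toNat_ofNat, if_pos (Or.inl h)]

-- A's classification agrees with B's arithmetic one whenever s-char code is in 71..122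
theorem pv_trans_eq (c1 c2 : Char) (h1 : 71 ≤ c1.toNat) (h2 : c1.toNat ≤ 122) :
    pvA_transformation_type c1 c2 =
      (if ((c2.toNat : Int) - 97) = 25 - PySem.Int.mod ((c1.toNat : Int) - 97) 26 then some (some pvTrans.rev)
       else if ((c2.toNat : Int) - 97) = PySem.Int.mod (((c1.toNat : Int) - 97) + 13) 26 then some (some pvTrans.opp)
       else some none) := by
  have hb1 : (-26 : Int) ≤ (c1.toNat : Int) - 97 := by omega
  have hb2 : ((c1.toNat : Int) - 97) ≤ 25 := by omega
  unfold pvA_transformation_type pvA_letter_value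
  rw [pv_reverse_map_get _ hb1 hb2, pv_opposite_map_get _ hb1 hb2]
  simp only [Option.some.injEq]
  set M1 := PySem.Int.mod ((c1.toNat : Int) - 97) 26 with hM1
  set M2 := PySem.Int.mod (((c1.toNat : Int) - 97) + 13) 26 with hM2
  have hm1 : 0 ≤ M1 := hM1 ▸ PySem.Int.mod_nonneg _ (by omega)
  have hm2 : M1 < 26 := hM1 ▸ PySem.Int.mod_lt _ (by omega)
  have hm3 : 0 ≤ M2 := hM2 ▸ PySem.Int.mod_nonneg _ (by omega)
  have hm4 : M2 < 26 := hM2 ▸ PySem.Int.mod_lt _ (by omega)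
  rw [pv_char_beq, pv_char_beq, pv_toNat_ofNat (122 - M1).toNat (by omega),
      pv_toNat_ofNat (97 + M2).toNat (by omega)]
  simp only [Nat.beq_eq_true_eq]
  split_ifs <;> first | rfl | omega

def pvName (a : Int) : pvTrans := if a = 0 then .rev else .opp

-- moves A still adds when the loop continues from state cur over the classified suffix
def pvExtra : Option pvTrans → List Int → Int
  | cur, [] => if cur.isSome then 1 else 0
  | cur, a :: rest =>
    (if some (pvName a) ≠ cur then (if cur.isSome then 1 else 0) else 0) + pvExtra (some (pvName a)) rest

-- number of adjacent unequal pairs (proof-side characterisation of the run count)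
def pvB_boundaries : List Int → Int
  | a :: b :: rest => (if b ≠ a then 1 else 0) + pvB_boundaries (b :: rest)
  | _ => 0

-- sequential classification of [i, n) into the list of types (proof-side; links the two ports)
def pvSeq (s t : List Char) (n i : Int) : Option (Option (List Int)) :=
  if h : i < n then
    match pvB_classify1 s t i with
    | none => none
    | some none => some none
    | some (some c) => (pvSeq s t n (i + 1)).map (Option.map (c :: ·))
  else some (some [])
termination_by (n - i).toNat
decreasing_by all_goals omega

theorem pv_classify1_01 (s t : List Char) (i x : Int)
    (h : pvB_classify1 s t i = some (some x)) : x = 0 ∨ x = 1 := by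
  unfold pvB_classify1 at h
  rcases hgs : PySem.List.pyGet? s i with _ | si <;> rw [hgs] at h
  · simp at h
  · rcases hgt : PySem.List.pyGet? t i with _ | ti <;> rw [hgt] at h
    · simp at h
    · simp only [] at h
      split_ifs at h <;> simp at h <;> omega

theorem pv_seq_01 (s t : List Char) (n i : Int) (l : List Int)
    (h : pvSeq s t n i = some (some l)) : ∀ x ∈ l, x = 0 ∨ x = 1 := by
  rw [pvSeq] at h
  by_cases hin : i < n
  · rw [dif_pos hin] at h
    rcases hc1 : pvB_classify1 s t i with _ | (_ | c) <;> rw [hc1] at h <;> try simp at h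
    rcases hc : pvSeq s t n (i + 1) with _ | (_ | l') <;> rw [hc] at h <;> simp at h
    rcases h with ⟨rfl⟩
    intro x hx
    rcases List.mem_cons.mp hx with rfl | hx
    · exact pv_classify1_01 s t i x hc1
    · exact pv_seq_01 s t n (i + 1) l' hc x hx
  · rw [dif_neg hin] at h
    have hl : l = [] := by simpa using h.symm
    subst hl
    intro x hx; simp at hx
termination_by (n - i).toNat
decreasing_by all_goals omega

theorem pv_seq_len (s t : List Char) (n : Int) : ∀ (i : Int) (l : List Int),
    pvSeq s t n i = some (some l) → (l.length : Int) = if i < n then n - i else 0 := by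
  intro i l h
  rw [pvSeq] at h
  by_cases hin : i < n
  · rw [dif_pos hin] at h
    rcases hc1 : pvB_classify1 s t i with _ | (_ | c) <;> rw [hc1] at h <;> try simp at h
    rcases hc : pvSeq s t n (i + 1) with _ | (_ | l') <;> rw [hc] at h <;> simp at h
    rcases h with ⟨rfl⟩
    have := pv_seq_len s t n (i + 1) l' hc
    simp only [List.length_cons, if_pos hin]
    by_cases h2 : i + 1 < n
    · rw [if_pos h2] at this; push_cast; omega
    · rw [if_neg h2] at this; push_cast; omega
  · rw [dif_neg hin] at h
    have hl : l = [] := by simpa using h.symm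
    subst hl; simp [hin]
termination_by i => (n - i).toNat
decreasing_by all_goals omega

theorem pv_extra_eq (l : List Int) (a : Int) (h : ∀ x ∈ a :: l, x = 0 ∨ x = 1) :
    pvExtra (some (pvName a)) l = 1 + pvB_boundaries (a :: l) := by
  induction l generalizing a with
  | nil => simp [pvExtra, pvB_boundaries]
  | cons b rest ih =>
    have ha := h a (by simp)
    have hb := h b (by simp)
    have hname : (some (pvName b) ≠ some (pvName a)) ↔ (b ≠ a) := by
      rcases ha with rfl | rfl <;> rcases hb with rfl | rfl <;> simp [pvName]
    have hrest : ∀ x ∈ b :: rest, x = 0 ∨ x = 1 := by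
      intro x hx; exact h x (by simp [List.mem_cons] at hx ⊢; tauto)
    simp only [pvExtra, pvB_boundaries, ih b hrest]
    by_cases hba : b = a
    · subst hba; simp
    · rw [if_pos (hname.mpr hba), if_pos hba]; simp; try ring

theorem pv_extra_none (l : List Int) (h : ∀ x ∈ l, x = 0 ∨ x = 1) :
    pvExtra none l = if l = [] then 0 else 1 + pvB_boundaries l := by
  cases l with
  | nil => simp [pvExtra]
  | cons a rest =>
    simp only [pvExtra, reduceCtorEq, ne_eq, not_false_eq_true, if_true, Option.isSome_none,
      Bool.false_eq_true, if_false, List.cons_ne_nil]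
    rw [pv_extra_eq rest a h]; simp

-- the central loop correspondence: A's scan from index a with k steps left vs the classified suffix
theorem pv_loop_eq (s t : List Char) (k : Nat) :
    ∀ (a : Int) (cur : Option pvTrans) (moves : Int), 0 ≤ a →
    (∀ i : Nat, (a : Int) ≤ i → (i : Int) < a + k →
        (∀ j : Nat, (a : Int) ≤ j → j < i → pvValid s t j = true) → pvSafe s t i = true) →
    pvA_loop s t (a + k) a cur moves =
      (match pvSeq s t (a + k) a with
       | some (some types) => some (moves + pvExtra cur types)
       | some none => some (-1)
       | none => none) := by
  induction k with
  | zero =>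
    intro a cur moves _ _
    rw [pvA_loop, pvSeq]
    rw [dif_neg (show ¬ a < a + ((0 : Nat) : Int) by omega)]
    rw [dif_neg (show ¬ a < a + ((0 : Nat) : Int) by omega)]
    cases cur <;> simp [pvExtra]
  | succ k ih =>
    intro a cur moves ha H
    have hlt : a < a + ((k + 1 : Nat) : Int) := by push_cast; omega
    rw [pvA_loop, pvSeq]
    rw [dif_pos hlt]
    rw [dif_pos hlt]
    have hsafe : pvSafe s t a.toNat = true := by
      apply H a.toNat (by omega) (by push_cast; omega)
      intro j hj1 hj2; omega
    simp only [pvSafe, Bool.and_eq_true, decide_eq_true_eq] at hsafe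
    obtain ⟨⟨⟨hls, hlt2⟩, h71⟩, h122⟩ := hsafe
    have hgs : PySem.List.pyGet? s a = some (s.getD a.toNat 'a') := by
      rw [PySem.List.pyGet?_of_nonneg s ha]
      simp [List.getD, List.getElem?_eq_getElem hls]
    have hgt : PySem.List.pyGet? t a = some (t.getD a.toNat 'a') := by
      rw [PySem.List.pyGet?_of_nonneg t ha]
      simp [List.getD, List.getElem?_eq_getElem hlt2]
    set si := s.getD a.toNat 'a' with hsi
    set ti := t.getD a.toNat 'a' with hti
    have htrans := pv_trans_eq si ti h71 h122
    have hC : pvB_classify1 s t a =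
        (if ((ti.toNat : Int) - 97) = 25 - PySem.Int.mod ((si.toNat : Int) - 97) 26 then some (some (0 : Int))
         else if ((ti.toNat : Int) - 97) = PySem.Int.mod (((si.toNat : Int) - 97) + 13) 26 then some (some 1)
         else some none) := by
      unfold pvB_classify1
      rw [hgs, hgt]
    have hrange : a + 1 + (k : Int) = a + (k + 1 : Nat) := by push_cast; ring
    have Hstep : pvValid s t a.toNat = true →
        (∀ i : Nat, (a + 1 : Int) ≤ i → (i : Int) < (a + 1) + k →
          (∀ j : Nat, (a + 1 : Int) ≤ j → j < i → pvValid s t j = true) → pvSafe s t i = true) := by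
      intro hvalid i hi1 hi2 hjs
      apply H i (by omega) (by push_cast at hi2 ⊢; omega)
      intro j hj1 hj2
      by_cases hja : (j : Int) = a
      · have : j = a.toNat := by omega
        rw [this]; exact hvalid
      · exact hjs j (by omega) hj2
    simp only [hgs, hgt]
    rw [htrans, hC]
    by_cases hr : ((ti.toNat : Int) - 97) = 25 - PySem.Int.mod ((si.toNat : Int) - 97) 26
    · -- reverse at index a
      have hvalid : pvValid s t a.toNat = true := by
        simp only [pvValid, pvSafe, Bool.and_eq_true, Bool.or_eq_true, decide_eq_true_eq]
        exact ⟨⟨⟨⟨hls, hlt2⟩, h71⟩, h122⟩, Or.inl hr⟩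
      simp only [if_pos hr]
      rcases hB : pvSeq s t (a + (k + 1 : Nat)) (a + 1) with _ | (_ | l) <;>
        [skip; skip; skip] <;>
      by_cases hc : some pvTrans.rev = cur
      · have hrec := ih (a + 1) (some pvTrans.rev) moves (by omega) (Hstep hvalid)
        rw [hrange, hB] at hrec
        rw [if_neg (show ¬(some pvTrans.rev ≠ cur) from fun h => h hc), ← hc, hrec]
        simp
      · have hrec := ih (a + 1) (some pvTrans.rev) (if cur.isSome then moves + 1 else moves) (by omega) (Hstep hvalid)
        rw [hrange, hB] at hrec
        rw [if_pos (show some pvTrans.rev ≠ cur from hc), hrec]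
        simp
      · have hrec := ih (a + 1) (some pvTrans.rev) moves (by omega) (Hstep hvalid)
        rw [hrange, hB] at hrec
        rw [if_neg (show ¬(some pvTrans.rev ≠ cur) from fun h => h hc), ← hc, hrec]
        simp
      · have hrec := ih (a + 1) (some pvTrans.rev) (if cur.isSome then moves + 1 else moves) (by omega) (Hstep hvalid)
        rw [hrange, hB] at hrec
        rw [if_pos (show some pvTrans.rev ≠ cur from hc), hrec]
        simp
      · have hrec := ih (a + 1) (some pvTrans.rev) moves (by omega) (Hstep hvalid)
        rw [hrange, hB] at hrec
        rw [if_neg (show ¬(some pvTrans.rev ≠ cur) from fun h => h hc), ← hc, hrec]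
        have hn : pvName 0 = pvTrans.rev := by simp [pvName]
        simp [pvExtra, hn]
      · have hrec := ih (a + 1) (some pvTrans.rev) (if cur.isSome then moves + 1 else moves) (by omega) (Hstep hvalid)
        rw [hrange, hB] at hrec
        rw [if_pos (show some pvTrans.rev ≠ cur from hc), hrec]
        have hn : pvName 0 = pvTrans.rev := by simp [pvName]
        have hind : (if some (pvName 0) ≠ cur then (if cur.isSome then (1:Int) else 0) else 0)
            = (if cur.isSome then (1:Int) else 0) := by
          rw [if_pos]; rw [hn]; exact hc
        simp only [pvExtra, hind, Option.map_some, Option.map_none, hn]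
        cases cur with
        | none => simp
        | some c =>
          have hnc : ¬ pvTrans.rev = c := fun h => hc (by rw [h])
          simp [hnc]; ring
    · simp only [if_neg hr]
      by_cases ho : ((ti.toNat : Int) - 97) = PySem.Int.mod (((si.toNat : Int) - 97) + 13) 26
      · -- opposite at index a
        have hvalid : pvValid s t a.toNat = true := by
          simp only [pvValid, pvSafe, Bool.and_eq_true, Bool.or_eq_true, decide_eq_true_eq]
          exact ⟨⟨⟨⟨hls, hlt2⟩, h71⟩, h122⟩, Or.inr ho⟩
        simp only [if_pos ho]
        rcases hB : pvSeq s t (a + (k + 1 : Nat)) (a + 1) with _ | (_ | l) <;>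
          [skip; skip; skip] <;>
        by_cases hc : some pvTrans.opp = cur
        · have hrec := ih (a + 1) (some pvTrans.opp) moves (by omega) (Hstep hvalid)
          rw [hrange, hB] at hrec
          rw [if_neg (show ¬(some pvTrans.opp ≠ cur) from fun h => h hc), ← hc, hrec]
          simp
        · have hrec := ih (a + 1) (some pvTrans.opp) (if cur.isSome then moves + 1 else moves) (by omega) (Hstep hvalid)
          rw [hrange, hB] at hrec
          rw [if_pos (show some pvTrans.opp ≠ cur from hc), hrec]
          simp
        · have hrec := ih (a + 1) (some pvTrans.opp) moves (by omega) (Hstep hvalid)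
          rw [hrange, hB] at hrec
          rw [if_neg (show ¬(some pvTrans.opp ≠ cur) from fun h => h hc), ← hc, hrec]
          simp
        · have hrec := ih (a + 1) (some pvTrans.opp) (if cur.isSome then moves + 1 else moves) (by omega) (Hstep hvalid)
          rw [hrange, hB] at hrec
          rw [if_pos (show some pvTrans.opp ≠ cur from hc), hrec]
          simp
        · have hrec := ih (a + 1) (some pvTrans.opp) moves (by omega) (Hstep hvalid)
          rw [hrange, hB] at hrec
          rw [if_neg (show ¬(some pvTrans.opp ≠ cur) from fun h => h hc), ← hc, hrec]
          have hn : pvName 1 = pvTrans.opp := by simp [pvName]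
          simp [pvExtra, hn]
        · have hrec := ih (a + 1) (some pvTrans.opp) (if cur.isSome then moves + 1 else moves) (by omega) (Hstep hvalid)
          rw [hrange, hB] at hrec
          rw [if_pos (show some pvTrans.opp ≠ cur from hc), hrec]
          have hn : pvName 1 = pvTrans.opp := by simp [pvName]
          have hind : (if some (pvName 1) ≠ cur then (if cur.isSome then (1:Int) else 0) else 0)
              = (if cur.isSome then (1:Int) else 0) := by
            rw [if_pos]; rw [hn]; exact hc
          simp only [pvExtra, hind, Option.map_some, Option.map_none, hn]
          cases cur with
          | none => simp
          | some c =>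
            have hnc : ¬ pvTrans.opp = c := fun h => hc (by rw [h])
            simp [hnc]; ring
      · simp only [if_neg ho]

-- splitting the sequential classification at mid
theorem pv_seq_append (s t : List Char) (k : Nat) :
    ∀ lo mid hi : Int, (mid - lo).toNat = k → lo ≤ mid → mid ≤ hi →
    pvSeq s t hi lo =
      (match pvSeq s t mid lo with
       | none => none
       | some none => some none
       | some (some l1) => (pvSeq s t hi mid).map (Option.map (l1 ++ ·))) := by
  induction k with
  | zero =>
    intro lo mid hi hk h1 h2
    have : mid = lo := by omega
    subst this
    rw [show pvSeq s t mid mid = some (some []) from by rw [pvSeq]; simp]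
    rcases h : pvSeq s t hi mid with _ | (_ | l) <;> simp [h]
  | succ k ih =>
    intro lo mid hi hk h1 h2
    have hlm : lo < mid := by omega
    have hlh : lo < hi := by omega
    rw [pvSeq, dif_pos hlh]
    conv_rhs => rw [pvSeq, dif_pos hlm]
    rcases hc : pvB_classify1 s t lo with _ | (_ | c)
    · rfl
    · rfl
    · have hrec := ih (lo + 1) mid hi (by omega) (by omega) h2
      rw [hrec]
      rcases hL : pvSeq s t mid (lo + 1) with _ | (_ | l1)
      · rfl
      · rfl
      · rcases hR : pvSeq s t hi mid with _ | (_ | l2) <;> simp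

theorem pv_headI_append (l1 l2 : List Int) (h : l1 ≠ []) : (l1 ++ l2).headI = l1.headI := by
  cases l1 with
  | nil => exact absurd rfl h
  | cons a r => simp

theorem pv_getLastD_append (l1 l2 : List Int) (h : l2 ≠ []) :
    (l1 ++ l2).getLastD 0 = l2.getLastD 0 := by
  rw [List.getLastD_eq_getLast?, List.getLastD_eq_getLast?, List.getLast?_append_of_ne_nil l1 h]

theorem pv_boundaries_append (l1 l2 : List Int) (h1 : l1 ≠ []) (h2 : l2 ≠ []) :
    pvB_boundaries (l1 ++ l2) =
      pvB_boundaries l1 + pvB_boundaries l2 + (if l1.getLastD 0 = l2.headI then 0 else 1) := by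
  induction l1 with
  | nil => exact absurd rfl h1
  | cons a r ih =>
    cases r with
    | nil =>
      cases l2 with
      | nil => exact absurd rfl h2
      | cons c cs =>
        have e1 : pvB_boundaries ([a] ++ c :: cs) =
            (if c ≠ a then (1:Int) else 0) + pvB_boundaries (c :: cs) := rfl
        have e2 : pvB_boundaries [a] = (0 : Int) := rfl
        have e3 : ([a] : List Int).getLastD 0 = a := rfl
        rw [e1, e2, e3]
        show _ = _ + _ + (if a = c then (0:Int) else 1)
        by_cases hca : a = c
        · subst hca; simp
        · rw [if_neg hca, if_pos (show c ≠ a from fun hh => hca hh.symm)]; ring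
    | cons b rs =>
      have hr : (b :: rs : List Int) ≠ [] := by simp
      have e1 : pvB_boundaries ((a :: b :: rs) ++ l2) =
          (if b ≠ a then (1:Int) else 0) + pvB_boundaries ((b :: rs) ++ l2) := rfl
      have e2 : pvB_boundaries (a :: b :: rs) =
          (if b ≠ a then (1:Int) else 0) + pvB_boundaries (b :: rs) := rfl
      have e3 : (a :: b :: rs : List Int).getLastD 0 = (b :: rs).getLastD 0 := by
        simp [List.getLastD_cons]
      rw [e1, ih hr, e2, e3]
      ring

-- correctness of the divide & conquer against the sequential classification
theorem pv_solve_eq (s t : List Char) (k : Nat) :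
    ∀ lo hi : Int, (hi - lo).toNat = k → 1 ≤ hi - lo →
    pvB_solve s t lo hi =
      (match pvSeq s t hi lo with
       | none => none
       | some none => some none
       | some (some l) => some (some (l.headI, l.getLastD 0, 1 + pvB_boundaries l))) := by
  induction k using Nat.strong_induction_on with
  | _ k ih =>
    intro lo hi hk h1
    by_cases hbase : hi - lo ≤ 1
    · -- hi = lo + 1
      have hhi : hi = lo + 1 := by omega
      subst hhi
      rw [pvB_solve, dif_pos (by omega)]
      rw [pvSeq, dif_pos (by omega)]
      rw [show pvSeq s t (lo + 1) (lo + 1) = some (some []) from by rw [pvSeq]; simp]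
      rcases hc : pvB_classify1 s t lo with _ | (_ | c) <;> simp [pvB_boundaries]
    · -- split at mid
      have hm : PySem.Int.floordiv (lo + hi) 2 = (lo + hi) / 2 :=
        PySem.Int.floordiv_eq_ediv_of_pos (by omega)
      set mid := PySem.Int.floordiv (lo + hi) 2 with hmid
      have hb1 : lo + 1 ≤ mid := by omega
      have hb2 : mid + 1 ≤ hi := by omega
      rw [pvB_solve, dif_neg hbase]
      rw [pv_seq_append s t (mid - lo).toNat lo mid hi rfl (by omega) (by omega)]
      have hLrec := ih (mid - lo).toNat (by omega) lo mid rfl (by omega)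
      have hRrec := ih (hi - mid).toNat (by omega) mid hi rfl (by omega)
      rw [← hmid] at *
      rw [hLrec, hRrec]
      rcases hL : pvSeq s t mid lo with _ | (_ | l1)
      · rfl
      · rfl
      · rcases hR : pvSeq s t hi mid with _ | (_ | l2)
        · rfl
        · rfl
        · have hl1 : l1 ≠ [] := by
            have := pv_seq_len s t mid lo l1 hL
            rw [if_pos (by omega)] at this
            intro h; subst h; simp at this; omega
          have hl2 : l2 ≠ [] := by
            have := pv_seq_len s t hi mid l2 hR
            rw [if_pos (by omega)] at this
            intro h; subst h; simp at this; omega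
          simp only [Option.map_some, Option.some.injEq, Prod.mk.injEq]
          refine ⟨(pv_headI_append l1 l2 hl1).symm, (pv_getLastD_append l1 l2 hl2).symm, ?_⟩
          rw [pv_boundaries_append l1 l2 hl1 hl2]
          by_cases he : l1.getLastD 0 = l2.headI
          · rw [if_pos he, if_pos he]; ring
          · rw [if_neg he, if_neg he]; ring

-- ===== VERDICT (by name: the statement is the Claim_ definition above) =====
theorem min_moves_to_transform_spec : Claim_equal_min_moves_to_transform := by
  intro n s t _hDom hPre
  unfold Spec_min_moves_to_transform min_moves_to_transform min_moves_to_transform_alt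
  by_cases hneg : n ≤ 0
  · rw [if_pos hneg]
    rw [pvA_loop, dif_neg (show ¬ (0 : Int) < n by omega)]
    simp
  · rw [if_neg (by omega)]
    have H0 : ∀ i : Nat, (0 : Int) ≤ i → (i : Int) < 0 + n.toNat →
        (∀ j : Nat, (0 : Int) ≤ j → j < i → pvValid s.toList t.toList j = true) →
        pvSafe s.toList t.toList i = true := by
      intro i _ hi hjs
      by_cases hil : i ≤ s.toList.length
      · exact hPre i (by omega) (fun j hj => hjs j (by omega) hj)
      · exfalso
        have hv := hjs s.toList.length (by omega) (by omega)
        simp only [pvValid, pvSafe, Bool.and_eq_true, decide_eq_true_eq] at hv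
        omega
    have key := pv_loop_eq s.toList t.toList n.toNat 0 none 0 le_rfl H0
    rw [show ((0 : Int) + (n.toNat : Int)) = n from by omega] at key
    rw [key]
    rw [pv_solve_eq s.toList t.toList (n - 0).toNat 0 n rfl (by omega)]
    rcases hB : pvSeq s.toList t.toList n 0 with _ | (_ | l)
    · simp
    · simp
    · have h01 := pv_seq_01 _ _ _ _ _ hB
      have hl : l ≠ [] := by
        have := pv_seq_len s.toList t.toList n 0 l hB
        rw [if_pos (by omega)] at this
        intro h; subst h; simp at this; omega
      simp only [Option.getD_some, zero_add]
      rw [pv_extra_none l h01, if_neg hl]
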